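-- pv_equiv track=rewrite | github.com/h-gajdov/gamonix | ai/eval.py | block_counts
-- ===== SOURCE A (Python) =====
-- from math import fabs
--
-- def block_counts(board):
--     def count_blocks(positive):
--         prevWasBlock = False
--         result = []
--         for idx, value in enumerate(board):
--             if idx == 0 or idx == 25: continue
--
--             if positive and value <= 0 or not positive and value >= 0:
--                 prevWasBlock = False
--                 continue
--
--             if fabs(value) < 2:
--                 prevWasBlock = False
--                 continue
--
--             if prevWasBlock: result[-1] += 1
--             else: result.append(1)
--             prevWasBlock = True
--         return result
--
--     light = count_blocks(True)
--     dark = count_blocks(False)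
--
--     return {'light': light, 'dark': dark}
-- ===== SOURCE B (Python) =====
-- from itertools import groupby
--
-- def block_counts(board):
--     def label(v):
--         return 'light' if v >= 2 else ('dark' if v <= -2 else None)
--     labels = [label(v) for i, v in enumerate(board) if i != 0 and i != 25]
--     runs = [(k, sum(1 for _ in g)) for k, g in groupby(labels)]
--     return {'light': [n for k, n in runs if k == 'light'],
--             'dark': [n for k, n in runs if k == 'dark']}
-- ===== Notes on version B (the rewrite author's own statement) =====
-- stated objective: idiomatic
-- what changed: Replaces the two flag-driven passes over the board with a single classify-then-groupby pass: each kept position is labelled light/dark/None once, run lengths come from itertools.groupby, and the two result lists are read off the runs.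
import Mathlib
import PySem

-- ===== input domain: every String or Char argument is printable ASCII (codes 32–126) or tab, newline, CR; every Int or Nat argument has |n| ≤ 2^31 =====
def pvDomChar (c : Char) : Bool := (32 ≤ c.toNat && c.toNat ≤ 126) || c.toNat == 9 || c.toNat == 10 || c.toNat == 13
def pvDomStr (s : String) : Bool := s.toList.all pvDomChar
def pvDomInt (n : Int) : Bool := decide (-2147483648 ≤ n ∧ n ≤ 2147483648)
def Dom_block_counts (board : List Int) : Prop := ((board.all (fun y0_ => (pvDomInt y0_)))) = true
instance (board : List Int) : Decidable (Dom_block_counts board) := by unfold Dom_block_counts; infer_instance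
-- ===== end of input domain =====

-- B replaces A's two flag-driven passes with one classify-then-groupby pass (idiomatic decomposition, same cost).

-- ===== PORT A =====
-- result[-1] += 1 : increments the last element; in A it only runs with result nonempty, where this is exact
def pvBumpLast : List Int → List Int
  | [] => []
  | [x] => [x + 1]
  | x :: y :: xs => x :: pvBumpLast (y :: xs)

-- the body of A's for-loop (state = (result, prevWasBlock)); branches in source order
def pvCbStep (positive : Bool) (s : List Int × Bool) (iv : Int × Int) : List Int × Bool :=
  if iv.1 = 0 ∨ iv.1 = 25 then s
  else if (positive ∧ iv.2 ≤ 0) ∨ (¬ positive = true ∧ iv.2 ≥ 0) then (s.1, false)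
  else if |iv.2| < 2 then (s.1, false)
  else if s.2 then (pvBumpLast s.1, true) else (s.1 ++ [1], true)

def pvCountBlocks (board : List Int) (positive : Bool) : List Int :=
  ((PySem.List.enumerate board).foldl (pvCbStep positive) ([], false)).1

def block_counts (board : List Int) : List (String × List Int) :=
  [("light", pvCountBlocks board true), ("dark", pvCountBlocks board false)]

-- ===== PORT B =====
def pvLabel (v : Int) : Option String :=
  if v ≥ 2 then some "light" else if v ≤ -2 then some "dark" else none

-- run-length encoding of consecutive equal labels = [(k, sum(1 for _ in g)) for k, g in groupby(labels)]
def pvRuns : List (Option String) → List (Option String × Int)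
  | [] => []
  | x :: xs =>
    (x, 1 + (xs.takeWhile (fun y => y = x)).length) :: pvRuns (xs.dropWhile (fun y => y = x))
termination_by l => l.length
decreasing_by
  exact Nat.lt_succ_of_le (List.length_dropWhile_le _ _)

def block_counts_alt (board : List Int) : List (String × List Int) :=
  let labels := ((PySem.List.enumerate board).filter
      (fun p => ¬ (p.1 = 0) ∧ ¬ (p.1 = 25))).map (fun p => pvLabel p.2)
  let runs := pvRuns labels
  [("light", (runs.filter (fun r => r.1 = some "light")).map (fun r => r.2)),
   ("dark", (runs.filter (fun r => r.1 = some "dark")).map (fun r => r.2))]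

-- ===== PRECONDITION & SPEC =====
def Spec_block_counts (board : List Int) (out : List (String × List Int)) : Prop := out = block_counts_alt board
instance (board : List Int) (out : List (String × List Int)) : Decidable (Spec_block_counts board out) := by unfold Spec_block_counts; infer_instance

-- ===== CLAIM (what is proved, stated in full; the proofs are below) =====
def Claim_equal_block_counts : Prop := ∀ (board : List Int), Dom_block_counts board → Spec_block_counts board (block_counts board)

-- ===== LEMMAS AND PROOFS =====

-- simplified per-value step of A's loop, parameterised by the kept-value predicate
def pvStepP (p : Int → Bool) (s : List Int × Bool) (v : Int) : List Int × Bool :=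
  if p v then (if s.2 then pvBumpLast s.1 else s.1 ++ [1], true) else (s.1, false)

-- extraction of one colour from B's runs
def pvG (lab : Option String) (xs : List Int) : List Int :=
  ((pvRuns (xs.map pvLabel)).filter (fun r => r.1 = lab)).map (fun r => r.2)

theorem pvBumpLast_append (l1 l2 : List Int) (h : l2 ≠ []) :
    pvBumpLast (l1 ++ l2) = l1 ++ pvBumpLast l2 := by
  induction l1 with
  | nil => rfl
  | cons a l1 ih =>
    cases l1 with
    | nil => cases l2 with
      | nil => exact absurd rfl h
      | cons b l2 => rfl
    | cons b l1 =>
      simp only [List.cons_append, pvBumpLast] at ih ⊢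
      rw [ih]

theorem pvFold_prefix (p : Int → Bool) (xs : List Int) (l1 l2 : List Int) (b : Bool)
    (h : b = true → l2 ≠ []) :
    xs.foldl (pvStepP p) (l1 ++ l2, b) = (l1 ++ (xs.foldl (pvStepP p) (l2, b)).1,
      (xs.foldl (pvStepP p) (l2, b)).2) := by
  induction xs generalizing l1 l2 b with
  | nil => simp
  | cons v xs ih =>
    simp only [List.foldl_cons, pvStepP]
    by_cases hv : p v
    · simp only [hv, if_pos]
      cases b with
      | false =>
        simp only [Bool.false_eq_true]
        rw [List.append_assoc]
        exact ih l1 (l2 ++ [1]) true (by simp)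
      | true =>
        rw [pvBumpLast_append _ _ (h rfl)]
        refine ih l1 (pvBumpLast l2) true ?_
        intro _
        cases l2 with
        | nil => exact absurd rfl (h rfl)
        | cons a l2 => cases l2 <;> simp [pvBumpLast]
    · simp only [hv, if_neg, Bool.false_eq_true, not_false_eq_true]
      exact ih l1 l2 false (by simp)

theorem pvFold_run (p : Int → Bool) (xs : List Int) (m : Int) :
    (xs.foldl (pvStepP p) ([m], true)).1
      = (m + ((xs.takeWhile p).length : Int))
          :: ((xs.dropWhile p).foldl (pvStepP p) ([], false)).1 := by
  induction xs generalizing m with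
  | nil => simp
  | cons v xs ih =>
    by_cases hv : p v
    · simp only [List.foldl_cons, pvStepP, hv, if_pos, List.takeWhile_cons_of_pos,
        List.dropWhile_cons_of_pos, pvBumpLast]
      rw [ih (m + 1)]
      simp only [List.length_cons]
      congr 1
      push_cast
      ring
    · simp only [List.foldl_cons, pvStepP, hv, Bool.false_eq_true, if_neg,
        List.takeWhile_cons_of_neg, List.dropWhile_cons_of_neg, not_false_eq_true]
      have h3 := pvFold_prefix p xs [m] [] false (by simp)
      simp only [List.append_nil] at h3
      rw [h3]
      simp

-- dropping a head whose label is not the selected one does not change the selected runs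
theorem pvG_cons_ne (lab l0 : Option String) (ls : List (Option String)) (h : l0 ≠ lab) :
    ((pvRuns (l0 :: ls)).filter (fun r => r.1 = lab)).map (fun r => r.2)
      = ((pvRuns ls).filter (fun r => r.1 = lab)).map (fun r => r.2) := by
  cases ls with
  | nil => simp [pvRuns, h]
  | cons l1 ls =>
    by_cases h1 : l1 = l0
    · subst h1
      rw [pvRuns, pvRuns]
      simp [h]
    · rw [pvRuns]
      simp [h, h1]

theorem pvMain (p : Int → Bool) (lab : Option String)
    (hp : ∀ v, p v = true ↔ pvLabel v = lab) (xs : List Int) :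
    (xs.foldl (pvStepP p) ([], false)).1 = pvG lab xs := by
  induction hn : xs.length using Nat.strong_induction_on generalizing xs with
  | _ n ih =>
  cases xs with
  | nil => simp [pvG, pvRuns]
  | cons v xs =>
    by_cases hv : p v
    · -- head starts a selected run
      have hl : pvLabel v = lab := (hp v).1 hv
      have hfun : ((fun y => decide (y = lab)) ∘ pvLabel) = p := by
        funext a
        cases ha : p a with
        | true => simp [(hp a).1 ha]
        | false =>
          have hne : ¬ pvLabel a = lab := fun hc => by simp [(hp a).2 hc] at ha
          simp [hne]
      have hmtw : (xs.map pvLabel).takeWhile (fun y => y = lab)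
          = (xs.takeWhile p).map pvLabel := by
        rw [List.takeWhile_map, hfun]
      have hmdw : (xs.map pvLabel).dropWhile (fun y => y = lab)
          = (xs.dropWhile p).map pvLabel := by
        rw [List.dropWhile_map, hfun]
      have hfold : (v :: xs).foldl (pvStepP p) ([], false) = xs.foldl (pvStepP p) ([1], true) := by
        simp [List.foldl_cons, pvStepP, hv]
      rw [hfold, pvFold_run]
      have ihd : ((xs.dropWhile p).foldl (pvStepP p) ([], false)).1 = pvG lab (xs.dropWhile p) := by
        refine ih (xs.dropWhile p).length ?_ _ rfl
        have hle := List.length_dropWhile_le p xs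
        simp only [List.length_cons] at hn
        omega
      rw [ihd]
      simp only [pvG, List.map_cons, hl]
      rw [pvRuns]
      rw [hmtw, hmdw]
      simp
    · -- head not selected
      have hl : pvLabel v ≠ lab := by
        intro h; exact absurd ((hp v).2 h) (by simp [hv])
      have hfold : (v :: xs).foldl (pvStepP p) ([], false) = xs.foldl (pvStepP p) ([], false) := by
        simp [List.foldl_cons, pvStepP, hv]
      rw [hfold]
      have ihx : (xs.foldl (pvStepP p) ([], false)).1 = pvG lab xs := by
        refine ih xs.length ?_ _ rfl
        simp only [List.length_cons] at hn
        omega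
      rw [ihx]
      unfold pvG
      rw [List.map_cons]
      exact (pvG_cons_ne lab (pvLabel v) (xs.map pvLabel) hl).symm

-- A's transliterated step agrees with the simplified per-value step on non-skipped indices
theorem pvStep_eq (positive : Bool) (p : Int → Bool)
    (hp : ∀ v, p v = (if positive then decide (2 ≤ v) else decide (v ≤ -2)))
    (s : List Int × Bool) (iv : Int × Int) (h : ¬ (iv.1 = 0 ∨ iv.1 = 25)) :
    pvCbStep positive s iv = pvStepP p s iv.2 := by
  obtain ⟨i, v⟩ := iv
  unfold pvCbStep pvStepP
  rw [if_neg h, hp]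
  by_cases hguard : ((positive = true) ∧ v ≤ 0) ∨ (¬ positive = true ∧ v ≥ 0)
  · rw [if_pos hguard]
    have hnp : (if positive = true then decide (2 ≤ v) else decide (v ≤ -2)) = false := by
      cases positive <;> simp_all <;> omega
    rw [hnp]
    rfl
  · rw [if_neg hguard]
    by_cases habs : |v| < 2
    · rw [if_pos habs]
      have h2 := abs_lt.mp habs
      have hnp : (if positive = true then decide (2 ≤ v) else decide (v ≤ -2)) = false := by
        cases positive <;> simp <;> omega
      rw [hnp]
      rfl
    · rw [if_neg habs]
      have hv2 : ¬ (-2 < v ∧ v < 2) := fun hc => habs (abs_lt.mpr hc)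
      have hnp : (if positive = true then decide (2 ≤ v) else decide (v ≤ -2)) = true := by
        cases positive <;> simp_all <;> omega
      rw [hnp]
      cases hs : s.2 <;> simp

theorem pvGuard_spec (p : Int → Bool) (l : List (Int × Int)) (s : List Int × Bool) :
    l.foldl (fun s x => if x.1 = 0 ∨ x.1 = 25 then s else pvStepP p s x.2) s
      = (((l.filter (fun x => decide (¬ (x.1 = 0 ∨ x.1 = 25)))).map
          (fun q => q.2)).foldl (pvStepP p) s) := by
  induction l generalizing s with
  | nil => rfl
  | cons x l ih =>
    by_cases h0 : x.1 = 0
    · simp [List.foldl_cons, h0, ih]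
    · by_cases h25 : x.1 = 25
      · simp [List.foldl_cons, h25, ih]
      · simp [List.foldl_cons, h0, h25, ih]

theorem pvCount_eq (board : List Int) (positive : Bool) (p : Int → Bool) (lab : Option String)
    (hp : ∀ v, p v = (if positive then decide (2 ≤ v) else decide (v ≤ -2)))
    (hl : ∀ v, p v = true ↔ pvLabel v = lab) :
    pvCountBlocks board positive
      = pvG lab ((((PySem.List.enumerate board).filter
          (fun q => decide (¬ (q.1 = 0 ∨ q.1 = 25)))).map (fun q => q.2))) := by
  unfold pvCountBlocks
  have hstep : pvCbStep positive
      = (fun (s : List Int × Bool) (x : Int × Int) =>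
          if x.1 = 0 ∨ x.1 = 25 then s else pvStepP p s x.2) := by
    funext s x
    by_cases h : x.1 = 0 ∨ x.1 = 25
    · simp [pvCbStep, h]
    · rw [if_neg h]; exact pvStep_eq positive p hp s x h
  rw [hstep, pvGuard_spec]
  exact pvMain p lab hl _

-- ===== VERDICT (by name: the statement is the Claim_ definition above) =====
theorem block_counts_spec : Claim_equal_block_counts := by
  intro board _
  unfold Spec_block_counts block_counts block_counts_alt
  have hfilt : ((PySem.List.enumerate board).filter
        (fun p => decide (¬ (p.1 = 0) ∧ ¬ (p.1 = 25))))
      = ((PySem.List.enumerate board).filter (fun q => decide (¬ (q.1 = 0 ∨ q.1 = 25)))) := by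
    apply List.filter_congr
    intro a _
    by_cases h0 : a.1 = 0 <;> by_cases h25 : a.1 = 25 <;> simp [h0, h25]
  simp only [hfilt]
  have hlight := pvCount_eq board true (fun v => decide (2 ≤ v)) (some "light")
    (by intro v; simp) (by intro v; by_cases h : (2:Int) ≤ v <;> simp [pvLabel, h] <;> omega)
  have hdark := pvCount_eq board false (fun v => decide (v ≤ -2)) (some "dark")
    (by intro v; simp) (by intro v; by_cases h : v ≤ (-2:Int) <;> simp [pvLabel, h] <;> omega)
  rw [hlight, hdark]
  simp only [pvG, List.map_map]
  rfl
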